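-- pv_equiv track=rewrite | github.com/CMU-TBD/Group_split_and_merge | gen_txt_data.py | revise_pedidx
-- ===== SOURCE A (Python) =====
-- def revise_pedidx(frames_arr, ped_idx_arr):
--     skip = 2
--     arr_length = len(frames_arr)
--     for i in range(arr_length):
--         max_ped_id = max(ped_idx_arr)
--         cur_frame_id = frames_arr[i]
--         cur_ped_id = ped_idx_arr[i]
--
--         check_frame_id = cur_frame_id - skip
--         frame_visit = []
--         for j in range(i):
--             if ped_idx_arr[j] == cur_ped_id:
--                 frame_visit.append(frames_arr[j])
--         if len(frame_visit) == 0: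
--             continue
--         if frame_visit[-1] == check_frame_id:
--             continue
--
--         for j in range(i, arr_length):
--             if ped_idx_arr[j] == cur_ped_id:
--                 ped_idx_arr[j] = max_ped_id + 1
--
--     return ped_idx_arr
-- ===== SOURCE B (Python) =====
-- def revise_pedidx(frames_arr, ped_idx_arr):
--     # Single pass: lazily relabel via a dict (original id -> current label),
--     # track last frame per current label, fresh labels from a running counter.
--     # Mutates ped_idx_arr in place like the original (final state identical).
--     n = len(frames_arr)
--     if n == 0:
--         return ped_idx_arr
--     counter = max(ped_idx_arr)
--     relabel = {}
--     last_frame = {}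
--     for i in range(n):
--         f = frames_arr[i]
--         orig = ped_idx_arr[i]
--         lab = relabel.get(orig, orig)
--         if lab in last_frame and last_frame[lab] != f - 2:
--             counter += 1
--             relabel[orig] = counter
--             lab = counter
--         last_frame[lab] = f
--         ped_idx_arr[i] = lab
--     return ped_idx_arr
-- ===== Notes on version B (the rewrite author's own statement) =====
-- stated objective: faster
-- what changed: A rescans the prefix for the pedestrian's previous frames, recomputes max() and sweeps the whole suffix to relabel at every row (O(n^2)); B does one pass keeping a dict from original id to its current label, a dict of last frame per current label, and a running max counter for fresh labels (O(n)).
import Mathlib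
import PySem

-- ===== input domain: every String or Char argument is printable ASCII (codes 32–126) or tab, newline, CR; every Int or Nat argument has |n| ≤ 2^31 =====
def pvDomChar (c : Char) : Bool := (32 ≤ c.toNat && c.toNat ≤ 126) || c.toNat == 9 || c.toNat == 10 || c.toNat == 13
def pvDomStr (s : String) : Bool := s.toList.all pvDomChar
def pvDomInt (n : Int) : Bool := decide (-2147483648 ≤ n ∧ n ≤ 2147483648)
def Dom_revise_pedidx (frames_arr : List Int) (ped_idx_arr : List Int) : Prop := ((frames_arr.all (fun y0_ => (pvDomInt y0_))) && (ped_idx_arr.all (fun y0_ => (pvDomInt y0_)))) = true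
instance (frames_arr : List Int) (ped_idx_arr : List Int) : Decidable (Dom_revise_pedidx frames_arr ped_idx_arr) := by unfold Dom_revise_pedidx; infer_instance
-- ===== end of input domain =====

-- B replaces A's O(n^2) rescans (frame_visit rebuild, max(), relabel sweep per row) by one pass
-- with dicts of current-label and last-frame per pedestrian and a running max counter (objective: faster).
-- Both A and B mutate ped_idx_arr in place in Python; the final list state equals the return value,
-- and the equivalence proved here is about that returned list.

-- ===== PORT A =====
-- frame_visit = [frames[j] for j in range(i) if ped[j] == cur]  (A's inner accumulation loop)
def frameVisitA (frames ped : List Int) (cur : Int) (i : Nat) : List Int :=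
  (List.range i).foldl
    (fun fv j => if ped.getD j 0 = cur then fv ++ [frames.getD j 0] else fv) []

-- for j in range(i, n): if ped[j] == cur: ped[j] = newId
def relabelA (ped : List Int) (i n : Nat) (cur newId : Int) : List Int :=
  (List.range' i (n - i)).foldl
    (fun p j => if p.getD j 0 = cur then p.set j newId else p) ped

-- one iteration of A's outer 'for i in range(arr_length)' loop ('continue' = state unchanged)
def stepA (frames : List Int) (n : Nat) (ped : List Int) (i : Nat) : List Int :=
  let maxPed := (PySem.List.max? ped (fun y => y)).getD 0
  let curFrame := frames.getD i 0
  let curPed := ped.getD i 0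
  let checkFrame := curFrame - 2
  let fv := frameVisitA frames ped curPed i
  if fv.length = 0 then ped
  else if PySem.List.pyGetD fv (-1) 0 = checkFrame then ped
  else relabelA ped i n curPed (maxPed + 1)

def revise_pedidx (frames_arr : List Int) (ped_idx_arr : List Int) : List Int :=
  (List.range frames_arr.length).foldl (stepA frames_arr frames_arr.length) ped_idx_arr

-- ===== PORT B =====
-- one iteration of B's single pass; state = (counter, relabel, last_frame, ped)
def stepB (frames : List Int)
    (st : Int × PySem.Dict Int Int × PySem.Dict Int Int × List Int) (i : Nat) :
    Int × PySem.Dict Int Int × PySem.Dict Int Int × List Int :=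
  let (counter, relabel, lastFrame, ped) := st
  let f := frames.getD i 0
  let orig := ped.getD i 0
  let lab := (relabel.get? orig).getD orig
  match lastFrame.get? lab with        -- 'lab in last_frame and last_frame[lab] != f - 2'
  | some lfv =>
      if lfv ≠ f - 2 then
        (counter + 1, relabel.insert orig (counter + 1),
          lastFrame.insert (counter + 1) f, ped.set i (counter + 1))
      else
        (counter, relabel, lastFrame.insert lab f, ped.set i lab)
  | none => (counter, relabel, lastFrame.insert lab f, ped.set i lab)

def revise_pedidx_alt (frames_arr : List Int) (ped_idx_arr : List Int) : List Int :=
  if frames_arr.length = 0 then ped_idx_arr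
  else
    ((List.range frames_arr.length).foldl (stepB frames_arr)
      (((PySem.List.max? ped_idx_arr (fun y => y)).getD 0),
        PySem.Dict.empty, PySem.Dict.empty, ped_idx_arr)).2.2.2

-- ===== PRECONDITION & SPEC =====
-- A raises (ValueError on max of an empty list, or IndexError on ped_idx_arr[i]) exactly when
-- ped_idx_arr is shorter than frames_arr; Pre_ excludes only those inputs.
def Pre_revise_pedidx (frames_arr : List Int) (ped_idx_arr : List Int) : Prop :=
  frames_arr.length ≤ ped_idx_arr.length
instance (frames_arr : List Int) (ped_idx_arr : List Int) : Decidable (Pre_revise_pedidx frames_arr ped_idx_arr) := by unfold Pre_revise_pedidx; infer_instance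

def pvWitness_revise_pedidx : List Int × List Int := ([1, 3, 6, 8], [0, 0, 0, 0])

def Spec_revise_pedidx (frames_arr : List Int) (ped_idx_arr : List Int) (out : List Int) : Prop := out = revise_pedidx_alt frames_arr ped_idx_arr
instance (frames_arr : List Int) (ped_idx_arr : List Int) (out : List Int) : Decidable (Spec_revise_pedidx frames_arr ped_idx_arr out) := by unfold Spec_revise_pedidx; infer_instance

-- ===== CLAIM (what is proved, stated in full; the proofs are below) =====
def Claim_equal_revise_pedidx : Prop := ∀ (frames_arr : List Int) (ped_idx_arr : List Int), Dom_revise_pedidx frames_arr ped_idx_arr → Pre_revise_pedidx frames_arr ped_idx_arr → Spec_revise_pedidx frames_arr ped_idx_arr (revise_pedidx frames_arr ped_idx_arr)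

-- ===== LEMMAS AND PROOFS =====

lemma getD_set_self (l : List Int) (i : Nat) (v : Int) (h : i < l.length) :
    (l.set i v).getD i 0 = v := by
  rw [List.getD_eq_getElem?_getD]; simp [h]

lemma getD_set_ne (l : List Int) (i j : Nat) (v : Int) (h : j ≠ i) :
    (l.set i v).getD j 0 = l.getD j 0 := by
  rw [List.getD_eq_getElem?_getD, List.getD_eq_getElem?_getD]
  simp [Ne.symm h]

lemma getD_le_of_forall_mem (P : List Int) (counter : Int) (j : Nat)
    (hj : j < P.length) (hle : ∀ x ∈ P, x ≤ counter) : P.getD j 0 ≤ counter := by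
  rw [List.getD_eq_getElem _ 0 hj]; exact hle _ (List.getElem_mem hj)

lemma stepA_eq (frames : List Int) (n : Nat) (ped : List Int) (i : Nat) :
    stepA frames n ped i =
      (if (frameVisitA frames ped (ped.getD i 0) i).length = 0 then ped
      else if PySem.List.pyGetD (frameVisitA frames ped (ped.getD i 0) i) (-1) 0
          = frames.getD i 0 - 2 then ped
      else relabelA ped i n (ped.getD i 0)
        (((PySem.List.max? ped (fun y => y)).getD 0) + 1)) := rfl

lemma stepB_eq (frames : List Int) (counter : Int) (m lf : PySem.Dict Int Int)
    (Q : List Int) (i : Nat) :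
    stepB frames (counter, m, lf, Q) i =
      (match lf.get? ((m.get? (Q.getD i 0)).getD (Q.getD i 0)) with
       | some lfv =>
          if lfv ≠ frames.getD i 0 - 2 then
            (counter + 1, m.insert (Q.getD i 0) (counter + 1),
              lf.insert (counter + 1) (frames.getD i 0), Q.set i (counter + 1))
          else
            (counter, m, lf.insert ((m.get? (Q.getD i 0)).getD (Q.getD i 0)) (frames.getD i 0),
              Q.set i ((m.get? (Q.getD i 0)).getD (Q.getD i 0)))
       | none =>
          (counter, m, lf.insert ((m.get? (Q.getD i 0)).getD (Q.getD i 0)) (frames.getD i 0),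
            Q.set i ((m.get? (Q.getD i 0)).getD (Q.getD i 0)))) := rfl

-- current label of an original id under B's relabel dict
def applyM (m : PySem.Dict Int Int) (x : Int) : Int := (m.get? x).getD x

lemma frameVisitA_succ (frames ped : List Int) (cur : Int) (i : Nat) :
    frameVisitA frames ped cur (i + 1) =
      frameVisitA frames ped cur i ++
        (if ped.getD i 0 = cur then [frames.getD i 0] else []) := by
  unfold frameVisitA
  rw [List.range_succ, List.foldl_append]
  simp only [List.foldl_cons, List.foldl_nil]
  split <;> simp

lemma frameVisitA_congr (frames ped ped' : List Int) (cur : Int) (i : Nat)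
    (h : ∀ j, j < i → ped.getD j 0 = ped'.getD j 0) :
    frameVisitA frames ped cur i = frameVisitA frames ped' cur i := by
  induction i with
  | zero => rfl
  | succ i ih =>
      rw [frameVisitA_succ, frameVisitA_succ, ih (fun j hj => h j (by omega)),
        h i (by omega)]

lemma relabelA_length (ped : List Int) (i n : Nat) (cur newId : Int) :
    (relabelA ped i n cur newId).length = ped.length := by
  unfold relabelA
  generalize List.range' i (n - i) = l
  induction l generalizing ped with
  | nil => rfl
  | cons j t ih =>
      simp only [List.foldl_cons]
      split
      · rw [ih]; exact List.length_set ..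
      · exact ih ped

-- a fold that conditionally sets distinct in-range positions, characterised pointwise
lemma foldl_set_getD (cur newId : Int) (l : List Nat) (hl : l.Nodup) (P : List Int)
    (hlen : ∀ j ∈ l, j < P.length) (k : Nat) :
    ((l.foldl (fun p j => if p.getD j 0 = cur then p.set j newId else p) P).getD k 0)
      = if k ∈ l ∧ P.getD k 0 = cur then newId else P.getD k 0 := by
  induction l generalizing P with
  | nil => rw [List.foldl_nil]; simp
  | cons j t ih =>
      simp only [List.foldl_cons]
      have hjP : j < P.length := hlen j (by simp)
      have hset : ∀ P' : List Int, ∀ k' : Nat, k' ≠ j →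
          (P.set j newId).getD k' 0 = P.getD k' 0 := by
        intro _ k' hk'
        rw [List.getD_eq_getElem?_getD, List.getD_eq_getElem?_getD]
        simp [Ne.symm hk']
      have htlen : ∀ P' : List Int, P'.length = P.length →
          ∀ j' ∈ t, j' < P'.length := by
        intro P' hP' j' hj'
        rw [hP']; exact hlen j' (by simp [hj'])
      have hnd := (List.nodup_cons.mp hl)
      by_cases hcond : P.getD j 0 = cur
      · rw [if_pos hcond,
          ih hnd.2 (P.set j newId) (htlen _ (List.length_set ..))]
        by_cases hkj : k = j
        · subst hkj
          have hkt : k ∉ t := hnd.1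
          have h1 : (P.set k newId).getD k 0 = newId := by
            rw [List.getD_eq_getElem?_getD, List.getElem?_set]
            simp [hjP]
          rw [if_neg (fun h => hkt h.1), h1, if_pos ⟨by simp, hcond⟩]
        · rw [hset P k hkj]
          by_cases hkt : k ∈ t <;> simp [hkt, hkj]
      · rw [if_neg hcond, ih hnd.2 P (htlen _ rfl)]
        by_cases hkj : k = j
        · subst hkj
          rw [if_neg (fun h => hnd.1 h.1), if_neg (fun h => hcond h.2)]
        · by_cases hkt : k ∈ t <;> simp [hkt, hkj]

lemma relabelA_getD (ped : List Int) (i n : Nat) (cur newId : Int) (k : Nat)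
    (hin : i ≤ n) (hnp : n ≤ ped.length) :
    (relabelA ped i n cur newId).getD k 0 =
      if i ≤ k ∧ k < n ∧ ped.getD k 0 = cur then newId else ped.getD k 0 := by
  unfold relabelA
  rw [foldl_set_getD cur newId _ List.nodup_range' ped
    (fun j hj => by have := List.mem_range'_1.mp hj; omega) k]
  have : k ∈ List.range' i (n - i) ↔ i ≤ k ∧ k < n := by
    rw [List.mem_range'_1]; omega
  by_cases hk : i ≤ k ∧ k < n
  · simp [this, hk]; try tauto
  · simp [this, hk]; try tauto

lemma max?_getD_eq (P : List Int) (counter : Int)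
    (hmem : counter ∈ P) (hle : ∀ x ∈ P, x ≤ counter) :
    (PySem.List.max? P (fun y => y)).getD 0 = counter := by
  cases hmax : PySem.List.max? P (fun y => y) with
  | none =>
      exact absurd ((PySem.List.max?_eq_none_iff P _).mp hmax)
        (List.ne_nil_of_mem hmem)
  | some c =>
      have h1 : c ≤ counter := hle c (PySem.List.max?_mem hmax)
      have h2 : counter ≤ c := PySem.List.max?_isMax hmax counter hmem
      simp [le_antisymm h1 h2]

lemma loop_eq (frames : List Int) (n : Nat) :
    ∀ fuel i (P Q : List Int) (counter : Int) (m lf : PySem.Dict Int Int),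
      n - i = fuel →
      P.length = Q.length → n ≤ Q.length →
      (∀ j, j < i ∨ n ≤ j → P.getD j 0 = Q.getD j 0) →
      (∀ j, i ≤ j → j < n → P.getD j 0 = applyM m (Q.getD j 0)) →
      (∀ x ∈ P, x ≤ counter) → counter ∈ P →
      (∀ L, lf.get? L = (frameVisitA frames P L i).getLast?) →
      (∀ j k, i ≤ j → j < n → i ≤ k → k < n →
        applyM m (Q.getD j 0) = applyM m (Q.getD k 0) → Q.getD j 0 = Q.getD k 0) →
      (List.range' i fuel).foldl (stepA frames n) P =
        ((List.range' i fuel).foldl (stepB frames) (counter, m, lf, Q)).2.2.2 := by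
  intro fuel
  induction fuel with
  | zero =>
      intro i P Q counter m lf hfuel hlen hnQ hout hmid hle hmem hlf hinj
      rw [show List.range' i 0 = [] from rfl]
      simp only [List.foldl_nil]
      apply List.ext_getElem hlen
      intro j h1 h2
      have hj := hout j (by omega)
      rwa [List.getD_eq_getElem _ 0 h1, List.getD_eq_getElem _ 0 h2] at hj
  | succ fuel ih =>
      intro i P Q counter m lf hfuel hlen hnQ hout hmid hle hmem hlf hinj
      have hi : i < n := by omega
      have hiP : i < P.length := by omega
      have hiQ : i < Q.length := by omega
      have hcur : P.getD i 0 = applyM m (Q.getD i 0) := hmid i le_rfl hi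
      have hALab : (m.get? (Q.getD i 0)).getD (Q.getD i 0) = P.getD i 0 := hcur.symm
      -- the common "continue" recursive call
      have hskip : (List.range' (i + 1) fuel).foldl (stepA frames n) P =
          ((List.range' (i + 1) fuel).foldl (stepB frames)
            (counter, m, lf.insert (P.getD i 0) (frames.getD i 0),
              Q.set i (P.getD i 0))).2.2.2 := by
        apply ih (i + 1) P (Q.set i (P.getD i 0)) counter m _ (by omega)
        · rw [List.length_set]; exact hlen
        · rw [List.length_set]; exact hnQ
        · intro j hj
          by_cases hji : j = i
          · subst hji; rw [getD_set_self _ _ _ hiQ]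
          · rw [getD_set_ne _ _ _ _ hji]; exact hout j (by omega)
        · intro j hj1 hj2
          rw [getD_set_ne _ _ _ _ (by omega)]
          exact hmid j (by omega) hj2
        · exact hle
        · exact hmem
        · intro L
          rw [frameVisitA_succ, PySem.Dict.get?_insert]
          by_cases hL : L = P.getD i 0
          · rw [if_pos hL, if_pos hL.symm, List.getLast?_concat]
          · rw [if_neg hL, if_neg (fun h => hL h.symm), List.append_nil]
            exact hlf L
        · intro j k hj1 hj2 hk1 hk2
          rw [getD_set_ne _ _ _ _ (by omega), getD_set_ne _ _ _ _ (by omega)]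
          exact hinj j k (by omega) hj2 (by omega) hk2
      rw [List.range'_succ]
      simp only [List.foldl_cons]
      rw [stepA_eq, stepB_eq, hALab]
      cases hget : lf.get? (P.getD i 0) with
      | none =>
          have hfv : frameVisitA frames P (P.getD i 0) i = [] :=
            List.getLast?_eq_none_iff.mp ((hlf (P.getD i 0)).symm.trans hget)
          dsimp only
          rw [if_pos (by rw [hfv]; rfl)]
          exact hskip
      | some lfv =>
          have hlast : (frameVisitA frames P (P.getD i 0) i).getLast? = some lfv :=
            ((hlf (P.getD i 0)).symm.trans hget)
          have hne : frameVisitA frames P (P.getD i 0) i ≠ [] := by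
            intro h; rw [h] at hlast; simp at hlast
          rw [if_neg (fun h => hne (List.length_eq_zero_iff.mp h))]
          have hpy : PySem.List.pyGetD (frameVisitA frames P (P.getD i 0) i) (-1) 0 = lfv := by
            rw [PySem.List.pyGetD_neg_one _ 0 hne]
            have := List.getLast?_eq_some_getLast (l := frameVisitA frames P (P.getD i 0) i) hne
            rw [this] at hlast
            exact Option.some_injective _ hlast
          by_cases hd : lfv = frames.getD i 0 - 2
          · rw [if_pos (by rw [hpy, hd])]
            dsimp only
            rw [if_neg (not_not_intro hd)]
            exact hskip
          · rw [if_neg (by rw [hpy]; exact hd), max?_getD_eq P counter hmem hle]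
            dsimp only
            rw [if_pos hd]
            -- the relabel recursive call
            apply ih (i + 1) (relabelA P i n (P.getD i 0) (counter + 1))
              (Q.set i (counter + 1)) (counter + 1)
              (m.insert (Q.getD i 0) (counter + 1))
              (lf.insert (counter + 1) (frames.getD i 0)) (by omega)
            · rw [relabelA_length, List.length_set]; exact hlen
            · rw [List.length_set]; exact hnQ
            · intro j hj
              rw [relabelA_getD _ _ _ _ _ _ (by omega) (by omega)]
              by_cases hji : j = i
              · subst hji
                rw [if_pos ⟨le_rfl, hi, rfl⟩, getD_set_self _ _ _ hiQ]
              · rw [if_neg (by rintro ⟨h1, h2, -⟩; omega), getD_set_ne _ _ _ _ hji]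
                exact hout j (by omega)
            · intro j hj1 hj2
              rw [relabelA_getD _ _ _ _ _ _ (by omega) (by omega),
                getD_set_ne _ _ _ _ (by omega)]
              unfold applyM
              rw [PySem.Dict.get?_insert]
              by_cases hQ : Q.getD j 0 = Q.getD i 0
              · rw [if_pos hQ]
                have : P.getD j 0 = P.getD i 0 := by
                  rw [hmid j (by omega) hj2, hcur, hQ]
                rw [if_pos ⟨by omega, hj2, this⟩]
                rfl
              · rw [if_neg hQ]
                have : ¬ P.getD j 0 = P.getD i 0 := by
                  intro h
                  exact hQ (hinj j i (by omega) hj2 le_rfl hi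
                    (by rw [← hmid j (by omega) hj2, ← hcur, h]))
                rw [if_neg (by rintro ⟨-, -, h⟩; exact this h)]
                exact hmid j (by omega) hj2
            · intro x hx
              obtain ⟨j, hj, rfl⟩ := List.mem_iff_getElem.mp hx
              have hjP : j < P.length := by
                rw [relabelA_length] at hj; exact hj
              rw [← List.getD_eq_getElem _ 0 hj,
                relabelA_getD _ _ _ _ _ _ (by omega) (by omega)]
              split
              · omega
              · have := getD_le_of_forall_mem P counter j hjP hle; omega
            · have hval : (relabelA P i n (P.getD i 0) (counter + 1)).getD i 0 = counter + 1 := by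
                rw [relabelA_getD _ _ _ _ _ _ (by omega) (by omega),
                  if_pos ⟨le_rfl, hi, rfl⟩]
              have hilen : i < (relabelA P i n (P.getD i 0) (counter + 1)).length := by
                rw [relabelA_length]; exact hiP
              exact List.mem_iff_getElem.mpr
                ⟨i, hilen, by rw [← List.getD_eq_getElem _ 0 hilen, hval]⟩
            · intro L
              have hPi' : (relabelA P i n (P.getD i 0) (counter + 1)).getD i 0 = counter + 1 := by
                rw [relabelA_getD _ _ _ _ _ _ (by omega) (by omega),
                  if_pos ⟨le_rfl, hi, rfl⟩]
              rw [frameVisitA_succ,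
                frameVisitA_congr frames _ P L i (fun j hj => by
                  rw [relabelA_getD _ _ _ _ _ _ (by omega) (by omega),
                    if_neg (by rintro ⟨h1, -, -⟩; omega)]),
                hPi', PySem.Dict.get?_insert]
              by_cases hL : L = counter + 1
              · rw [if_pos hL, if_pos hL.symm, List.getLast?_concat]
              · rw [if_neg hL, if_neg (fun h => hL h.symm), List.append_nil]
                exact hlf L
            · intro j k hj1 hj2 hk1 hk2 heq
              rw [getD_set_ne _ _ _ _ (by omega), getD_set_ne _ _ _ _ (by omega)] at heq ⊢
              have hbound : ∀ j', i ≤ j' → j' < n → applyM m (Q.getD j' 0) ≤ counter := by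
                intro j' h1 h2
                rw [← hmid j' h1 h2]
                exact getD_le_of_forall_mem P counter j' (by omega) hle
              unfold applyM at heq
              rw [PySem.Dict.get?_insert, PySem.Dict.get?_insert] at heq
              by_cases hQj : Q.getD j 0 = Q.getD i 0 <;>
                by_cases hQk : Q.getD k 0 = Q.getD i 0
              · rw [hQj, hQk]
              · rw [if_pos hQj, if_neg hQk] at heq
                have := hbound k (by omega) hk2
                unfold applyM at this
                simp only [Option.getD_some] at heq
                omega
              · rw [if_neg hQj, if_pos hQk] at heq
                have := hbound j (by omega) hj2
                unfold applyM at this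
                simp only [Option.getD_some] at heq
                omega
              · rw [if_neg hQj, if_neg hQk] at heq
                exact hinj j k (by omega) hj2 (by omega) hk2 heq

-- ===== VERDICT (by name: the statement is the Claim_ definition above) =====
theorem revise_pedidx_spec : Claim_equal_revise_pedidx := by
  intro frames ped _hdom hpre
  unfold Spec_revise_pedidx revise_pedidx revise_pedidx_alt Pre_revise_pedidx at *
  by_cases h0 : frames.length = 0
  · rw [if_pos h0, h0]
    rfl
  · rw [if_neg h0]
    have hne : ped ≠ [] := by
      intro h; subst h; simp only [List.length_nil] at hpre; omega
    cases hmax : PySem.List.max? ped (fun y => y) with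
    | none => exact absurd ((PySem.List.max?_eq_none_iff ped _).mp hmax) hne
    | some c =>
        simp only [Option.getD_some]
        rw [List.range_eq_range']
        apply loop_eq frames frames.length frames.length 0 ped ped c
          PySem.Dict.empty PySem.Dict.empty (by omega) rfl hpre
        · intro j _; rfl
        · intro j _ _; unfold applyM; rw [PySem.Dict.get?_empty]; rfl
        · exact fun x hx => PySem.List.max?_isMax hmax x hx
        · exact PySem.List.max?_mem hmax
        · intro L; rw [PySem.Dict.get?_empty]; rfl
        · intro j k _ _ _ _ h
          unfold applyM at h
          rwa [PySem.Dict.get?_empty, PySem.Dict.get?_empty] at h
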